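-- pv_equiv track=rewrite | github.com/XiaoqianXiao/narsad_multivoxel | group_level_workflows.py | calculate_cell_index
-- ===== SOURCE A (Python) =====
-- def calculate_cell_index(row, factor_levels, factor_names):
--     """Calculate cell index for a given combination of factor levels."""
--     cell_idx = 0
--     multiplier = 1
--
--     for i, factor_name in enumerate(factor_names):
--         factor_value = row[factor_name]
--         level_idx = factor_levels[factor_name].index(factor_value)
--         cell_idx += level_idx * multiplier
--
--         # Update multiplier for next factor
--         if i < len(factor_names) - 1:
--             next_factor = factor_names[i + 1]
--             multiplier *= len(factor_levels[next_factor])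
--
--     return cell_idx
-- ===== SOURCE B (Python) =====
-- def calculate_cell_index(row, factor_levels, factor_names):
--     """Calculate cell index for a given combination of factor levels.
--
--     Reverse (Horner) evaluation: iterate the factors from last to first,
--     scaling the accumulator by the size of the factor just processed."""
--     cell_idx = 0
--     next_size = 1
--     for factor_name in reversed(factor_names):
--         levels = factor_levels[factor_name]
--         cell_idx = cell_idx * next_size + levels.index(row[factor_name])
--         next_size = len(levels)
--     return cell_idx
-- ===== Notes on version B (the rewrite author's own statement) =====
-- stated objective: simpler
-- what changed: Replaced A's forward loop with a running multiplier and a look-ahead at the next factor's level list by a reverse (Horner) pass that scales the accumulator by the size of the factor just processed, removing the look-ahead and the index bookkeeping.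
import Mathlib
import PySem

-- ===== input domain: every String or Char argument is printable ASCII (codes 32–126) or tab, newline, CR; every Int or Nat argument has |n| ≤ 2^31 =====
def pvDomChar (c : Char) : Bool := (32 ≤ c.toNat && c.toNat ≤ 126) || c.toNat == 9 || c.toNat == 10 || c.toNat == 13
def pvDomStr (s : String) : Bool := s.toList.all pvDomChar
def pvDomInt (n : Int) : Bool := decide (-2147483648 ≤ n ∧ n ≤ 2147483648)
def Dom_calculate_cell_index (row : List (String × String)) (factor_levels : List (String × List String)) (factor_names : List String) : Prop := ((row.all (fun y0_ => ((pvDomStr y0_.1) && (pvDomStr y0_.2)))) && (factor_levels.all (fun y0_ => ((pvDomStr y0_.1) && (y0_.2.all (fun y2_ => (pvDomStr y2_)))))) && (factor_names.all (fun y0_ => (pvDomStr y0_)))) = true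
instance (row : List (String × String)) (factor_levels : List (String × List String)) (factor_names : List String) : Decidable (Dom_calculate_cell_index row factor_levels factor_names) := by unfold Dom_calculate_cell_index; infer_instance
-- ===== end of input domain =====

-- B replaces A's forward pass with a running multiplier by a reverse (Horner) pass over the
-- factors, which removes the look-ahead at the next factor's level list (objective: simpler).


-- ===== PORT A =====
-- Literal transliteration of A: forward loop over enumerate(factor_names) carrying
-- (cell_idx, multiplier); the dict lookups / list.index that raise in Python are taken
-- with .getD defaults, exact on Pre_ (which excludes exactly the raising inputs).
def calculate_cell_index (row : List (String × String)) (factor_levels : List (String × List String)) (factor_names : List String) : Int :=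
  ((PySem.List.enumerate factor_names 0).foldl
    (fun (st : Int × Int) (p : Int × String) =>
      let factor_value := (PySem.Dict.get? (PySem.Dict.mk row) p.2).getD ""
      let level_idx : Int := (((PySem.List.index? ((PySem.Dict.get? (PySem.Dict.mk factor_levels) p.2).getD []) factor_value).getD 0 : Nat) : Int)
      let cell_idx := st.1 + level_idx * st.2
      let multiplier :=
        if p.1 < (factor_names.length : Int) - 1 then
          let next_factor := (PySem.List.pyGet? factor_names (p.1 + 1)).getD ""
          st.2 * (((PySem.Dict.get? (PySem.Dict.mk factor_levels) next_factor).getD []).length : Int)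
        else st.2
      (cell_idx, multiplier))
    (0, 1)).1

-- ===== PORT B =====
-- Literal transliteration of B: reversed(factor_names) fold carrying (cell_idx, next_size).
def calculate_cell_index_alt (row : List (String × String)) (factor_levels : List (String × List String)) (factor_names : List String) : Int :=
  (factor_names.reverse.foldl
    (fun (st : Int × Int) (factor_name : String) =>
      let levels := (PySem.Dict.get? (PySem.Dict.mk factor_levels) factor_name).getD []
      (st.1 * st.2 + (((PySem.List.index? levels ((PySem.Dict.get? (PySem.Dict.mk row) factor_name).getD "")).getD 0 : Nat) : Int),
       (levels.length : Int)))
    (0, 1)).1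

-- ===== PRECONDITION & SPEC =====
-- Pre_ excludes exactly the inputs where Python A raises: some factor name missing from
-- row (KeyError) or from factor_levels (KeyError), or the row's value absent from that
-- factor's level list (ValueError).
def Pre_calculate_cell_index (row : List (String × String)) (factor_levels : List (String × List String)) (factor_names : List String) : Prop :=
  ∀ name ∈ factor_names,
    (PySem.Dict.get? (PySem.Dict.mk row) name).isSome = true ∧
    (PySem.Dict.get? (PySem.Dict.mk factor_levels) name).isSome = true ∧
    ((PySem.Dict.get? (PySem.Dict.mk row) name).getD "") ∈ ((PySem.Dict.get? (PySem.Dict.mk factor_levels) name).getD [])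
instance (row : List (String × String)) (factor_levels : List (String × List String)) (factor_names : List String) : Decidable (Pre_calculate_cell_index row factor_levels factor_names) := by unfold Pre_calculate_cell_index; infer_instance

def pvWitness_calculate_cell_index : (List (String × String)) × (List (String × List String)) × List String :=
  ([("drug", "B"), ("group", "HC")], [("drug", ["A", "B"]), ("group", ["HC", "MDD"])], ["drug", "group"])

def Spec_calculate_cell_index (row : List (String × String)) (factor_levels : List (String × List String)) (factor_names : List String) (out : Int) : Prop := out = calculate_cell_index_alt row factor_levels factor_names
instance (row : List (String × String)) (factor_levels : List (String × List String)) (factor_names : List String) (out : Int) : Decidable (Spec_calculate_cell_index row factor_levels factor_names out) := by unfold Spec_calculate_cell_index; infer_instance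

-- ===== CLAIM (what is proved, stated in full; the proofs are below) =====
def Claim_equal_calculate_cell_index : Prop := ∀ (row : List (String × String)) (factor_levels : List (String × List String)) (factor_names : List String), Dom_calculate_cell_index row factor_levels factor_names → Pre_calculate_cell_index row factor_levels factor_names → Spec_calculate_cell_index row factor_levels factor_names (calculate_cell_index row factor_levels factor_names)

-- ===== LEMMAS AND PROOFS =====

-- level index of one factor (as both ports compute it)
def pvLidx (row : List (String × String)) (factor_levels : List (String × List String)) (name : String) : Int :=
  (((PySem.List.index? ((PySem.Dict.get? (PySem.Dict.mk factor_levels) name).getD []) ((PySem.Dict.get? (PySem.Dict.mk row) name).getD "")).getD 0 : Nat) : Int)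

-- number of levels of one factor
def pvFlen (factor_levels : List (String × List String)) (name : String) : Int :=
  (((PySem.Dict.get? (PySem.Dict.mk factor_levels) name).getD []).length : Int)

-- size of the FIRST factor of a (suffix of the) factor list; 1 for the empty suffix
def pvHeadLen (factor_levels : List (String × List String)) : List String → Int
  | [] => 1
  | y :: _ => pvFlen factor_levels y

-- Horner form of the mixed-radix value of a suffix of factors
def pvHorner (row : List (String × String)) (factor_levels : List (String × List String)) : List String → Int
  | [] => 0
  | x :: rest => pvHorner row factor_levels rest * pvHeadLen factor_levels rest + pvLidx row factor_levels x

-- B's reversed fold computes (Horner value, size of first factor)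
theorem alt_foldr (row : List (String × String)) (factor_levels : List (String × List String)) :
    ∀ (names : List String),
      names.foldr
        (fun (factor_name : String) (st : Int × Int) =>
          let levels := (PySem.Dict.get? (PySem.Dict.mk factor_levels) factor_name).getD []
          (st.1 * st.2 + (((PySem.List.index? levels ((PySem.Dict.get? (PySem.Dict.mk row) factor_name).getD "")).getD 0 : Nat) : Int),
           (levels.length : Int)))
        (0, 1)
      = (pvHorner row factor_levels names, pvHeadLen factor_levels names) := by
  intro names
  induction names with
  | nil => simp [pvHorner, pvHeadLen]
  | cons x rest ih =>
      simp only [List.foldr_cons, ih, pvHorner]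
      cases rest with
      | nil => simp [pvHeadLen, pvFlen, pvLidx, pvHorner]
      | cons y rest' => simp [pvHeadLen, pvFlen, pvLidx]

theorem alt_eq_horner (row : List (String × String)) (factor_levels : List (String × List String)) (names : List String) :
    calculate_cell_index_alt row factor_levels names = pvHorner row factor_levels names := by
  unfold calculate_cell_index_alt
  rw [List.foldl_reverse]
  have := alt_foldr row factor_levels names
  simp only [this]

-- A's forward fold, started at index k on the suffix names.drop k, adds mult * Horner(suffix)
theorem a_foldl (row : List (String × String)) (factor_levels : List (String × List String)) (names : List String) :
    ∀ (suffix : List String) (k : Nat) (acc mult : Int), names.drop k = suffix →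
      ((PySem.List.enumerate suffix (k : Int)).foldl
        (fun (st : Int × Int) (p : Int × String) =>
          let factor_value := (PySem.Dict.get? (PySem.Dict.mk row) p.2).getD ""
          let level_idx : Int := (((PySem.List.index? ((PySem.Dict.get? (PySem.Dict.mk factor_levels) p.2).getD []) factor_value).getD 0 : Nat) : Int)
          let cell_idx := st.1 + level_idx * st.2
          let multiplier :=
            if p.1 < (names.length : Int) - 1 then
              let next_factor := (PySem.List.pyGet? names (p.1 + 1)).getD ""
              st.2 * (((PySem.Dict.get? (PySem.Dict.mk factor_levels) next_factor).getD []).length : Int)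
            else st.2
          (cell_idx, multiplier))
        (acc, mult)).1
      = acc + mult * pvHorner row factor_levels suffix := by
  intro suffix
  induction suffix with
  | nil => intro k acc mult _; simp [PySem.List.enumerate_nil, pvHorner]
  | cons x rest ih =>
      intro k acc mult hdrop
      have hlen : names.length = k + 1 + rest.length := by
        have := congrArg List.length hdrop
        simp [List.length_drop] at this
        omega
      have hdrop' : names.drop (k + 1) = rest := by
        have : names.drop (k + 1) = (names.drop k).drop 1 := by
          rw [List.drop_drop]
        rw [this, hdrop]; rfl
      rw [PySem.List.enumerate_cons, List.foldl_cons]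
      cases rest with
      | nil =>
          have hcond : ¬ ((k : Int) < (names.length : Int) - 1) := by
            simp [hlen]
          simp only [hcond, if_false]
          have h1 : ((k : Int) + 1) = ((k + 1 : Nat) : Int) := by push_cast; ring
          rw [h1, ih (k + 1) _ _ hdrop']
          simp [pvHorner, pvLidx, pvHeadLen]; ring
      | cons y rest' =>
          have hcond : ((k : Int) < (names.length : Int) - 1) := by
            simp [hlen]; omega
          have hget : PySem.List.pyGet? names ((k : Int) + 1) = some y := by
            have h1 : ((k : Int) + 1) = ((k + 1 : Nat) : Int) := by push_cast; ring
            rw [h1, PySem.List.pyGet?_natCast]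
            have : names[k + 1]? = (names.drop (k + 1))[0]? := by
              rw [List.getElem?_drop]
            rw [this, hdrop']; rfl
          simp only [hcond, if_true, hget]
          have h1 : ((k : Int) + 1) = ((k + 1 : Nat) : Int) := by push_cast; ring
          rw [h1, ih (k + 1) _ _ hdrop']
          simp only [Option.getD_some, pvHorner, pvLidx, pvHeadLen, pvFlen]
          ring

theorem a_eq_horner (row : List (String × String)) (factor_levels : List (String × List String)) (names : List String) :
    calculate_cell_index row factor_levels names = pvHorner row factor_levels names := by
  unfold calculate_cell_index
  have h := a_foldl row factor_levels names names 0 0 1 (by simp)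
  simpa using h

-- ===== VERDICT (by name: the statement is the Claim_ definition above) =====
theorem calculate_cell_index_spec : Claim_equal_calculate_cell_index := by
  intro row factor_levels factor_names _ _
  unfold Spec_calculate_cell_index
  rw [a_eq_horner, alt_eq_horner]
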